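-- pv_equiv track=rewrite | github.com/BruceCodin/practice-coding-problems | advent-code-2021/day-5/b.py | return_overlap_count
-- ===== SOURCE A (Python) =====
-- def return_overlap_count(all_cords: list[tuple[int, int]]) -> int:
--     """Return the integer number of all the points that overlap twice"""
--     overlap_dict = dict()
--
--     for cord in all_cords:
--         if cord in overlap_dict:
--             overlap_dict[cord] += 1
--
--         else:
--             overlap_dict[cord] = 1
--
--     result = 0
--     for cord_key, val in overlap_dict.items():
--         if val > 1:
--             result += 1
--
--     return result
-- ===== SOURCE B (Python) =====
-- def return_overlap_count(all_cords: list[tuple[int, int]]) -> int: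
--     """Return the integer number of all the points that overlap twice"""
--     result = 0
--     prev = None
--     run = 0
--     for cord in sorted(all_cords):
--         if prev == cord:
--             run += 1
--             if run == 2:
--                 result += 1
--         else:
--             prev = cord
--             run = 1
--     return result
-- ===== Notes on version B (the rewrite author's own statement) =====
-- stated objective: alternative
-- what changed: Replaced the frequency dictionary plus a second counting pass by sort-then-scan: one linear pass over sorted(all_cords) tracking the current run of equal tuples, incrementing the result exactly when a run reaches length 2.
import Mathlib
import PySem

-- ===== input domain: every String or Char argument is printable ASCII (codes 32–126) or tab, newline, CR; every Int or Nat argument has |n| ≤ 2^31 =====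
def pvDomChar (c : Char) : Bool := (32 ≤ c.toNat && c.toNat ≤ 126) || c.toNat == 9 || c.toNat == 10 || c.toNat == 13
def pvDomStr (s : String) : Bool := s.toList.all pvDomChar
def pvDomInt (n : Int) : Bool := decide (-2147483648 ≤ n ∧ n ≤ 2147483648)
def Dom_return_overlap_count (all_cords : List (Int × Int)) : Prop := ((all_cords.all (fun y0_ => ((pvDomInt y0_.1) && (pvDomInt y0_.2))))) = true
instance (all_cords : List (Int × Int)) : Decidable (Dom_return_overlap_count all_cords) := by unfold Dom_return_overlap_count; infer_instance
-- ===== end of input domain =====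

-- B replaces A's frequency dictionary plus second counting pass by sort-then-scan run grouping (alternative decomposition, same results).

-- ===== PORT A =====
-- 'overlap_dict[cord] += 1' is Dict.modify cord 0 (· + 1): exact here since the branch runs only when cord is a key.
def return_overlap_count (all_cords : List (Int × Int)) : Int :=
  let overlap_dict := all_cords.foldl
    (fun d cord => if d.contains cord then d.modify cord 0 (· + 1) else d.insert cord (1 : Int))
    PySem.Dict.empty
  overlap_dict.items.foldl (fun result p => if 1 < p.2 then result + 1 else result) 0

-- ===== PORT B =====
-- the 'for cord in sorted(all_cords)' loop of Source B, with its three accumulators (result, prev, run)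
def pvScan : List (Int × Int) → Option (Int × Int) → Int → Int → Int
  | [], _prev, _run, result => result
  | cord :: rest, prev, run, result =>
    if prev = some cord then
      pvScan rest prev (run + 1) (if run + 1 = 2 then result + 1 else result)
    else
      pvScan rest (some cord) 1 result

def return_overlap_count_alt (all_cords : List (Int × Int)) : Int :=
  pvScan (PySem.List.sorted2 all_cords (fun c => c.1) (fun c => c.2) false) none 0 0

-- ===== PRECONDITION & SPEC =====
def Spec_return_overlap_count (all_cords : List (Int × Int)) (out : Int) : Prop := out = return_overlap_count_alt all_cords
instance (all_cords : List (Int × Int)) (out : Int) : Decidable (Spec_return_overlap_count all_cords out) := by unfold Spec_return_overlap_count; infer_instance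

-- ===== CLAIM (what is proved, stated in full; the proofs are below) =====
def Claim_equal_return_overlap_count : Prop := ∀ (all_cords : List (Int × Int)), Dom_return_overlap_count all_cords → Spec_return_overlap_count all_cords (return_overlap_count all_cords)

-- ===== LEMMAS AND PROOFS =====

-- the common specification: number of distinct points occurring at least twice
def pvDups (l : List (Int × Int)) : Nat :=
  (l.toFinset.filter (fun c => 2 ≤ l.count c)).card

lemma pvDups_perm {l l' : List (Int × Int)} (h : l.Perm l') : pvDups l = pvDups l' := by
  unfold pvDups
  rw [show l.toFinset = l'.toFinset by ext x; simp [h.mem_iff]]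
  congr 1
  apply Finset.filter_congr
  intro x _
  simp [h.count_eq]

-- sorted2's comparison IS the lexicographic order on Int × Int
lemma pv_before_eq :
    (fun (a b : Int × Int) => decide (a.1 < b.1) || (!decide (b.1 < a.1) && decide (a.2 < b.2)))
      = fun a b => decide (toLex a < toLex b) := by
  funext a b
  by_cases h1 : a.1 < b.1 <;> by_cases h2 : b.1 < a.1 <;> by_cases h3 : a.2 < b.2 <;>
    simp [Prod.Lex.lt_iff, h1, h2, h3] <;> omega

lemma pv_foldl_insertBy_pairwise (xs : List (Int × Int)) :
    ∀ acc : List (Int × Int), acc.Pairwise (fun a b => toLex a ≤ toLex b) →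
    (xs.foldl (fun acc x => PySem.List.insertBy
        (fun a b => decide ((toLex a : Lex (Int × Int)) < toLex b)) x acc) acc).Pairwise
      (fun a b => toLex a ≤ toLex b) := by
  induction xs with
  | nil => intro acc h; simpa using h
  | cons x t ih =>
    intro acc h
    simp only [List.foldl_cons]
    exact ih _ (PySem.List.insertBy_pairwise_le (fun c => (toLex c : Lex (Int × Int))) x acc h)

lemma pv_sorted2_pairwise (xs : List (Int × Int)) :
    (PySem.List.sorted2 xs (fun c => c.1) (fun c => c.2) false).Pairwise
      (fun a b => toLex a ≤ toLex b) := by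
  have h : PySem.List.sorted2 xs (fun c => c.1) (fun c => c.2) false
      = xs.foldl (fun acc x => PySem.List.insertBy
          (fun a b => decide ((toLex a : Lex (Int × Int)) < toLex b)) x acc) [] := by
    simp only [PySem.List.sorted2, Bool.false_eq_true, if_false]
    rw [← pv_before_eq]
  rw [h]
  exact pv_foldl_insertBy_pairwise xs [] List.Pairwise.nil

lemma pvScan_add (l : List (Int × Int)) : ∀ (p : Option (Int × Int)) (run x res : Int),
    pvScan l p run (x + res) = x + pvScan l p run res := by
  induction l with
  | nil => intro p run x res; simp [pvScan]
  | cons c t ih =>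
    intro p run x res
    simp only [pvScan]
    split
    · rw [show (if run + 1 = 2 then x + res + 1 else x + res)
          = x + (if run + 1 = 2 then res + 1 else res) by split_ifs <;> ring]
      exact ih _ _ _ _
    · exact ih _ _ _ _

lemma pvScan_run2 (c : Int × Int) (m : Nat) : ∀ (u : List (Int × Int)) (run res : Int), 2 ≤ run →
    pvScan (List.replicate m c ++ u) (some c) run res = pvScan u (some c) (run + m) res := by
  induction m with
  | zero => intro u run res _; simp
  | succ k ih =>
    intro u run res h
    rw [List.replicate_succ, List.cons_append]
    simp only [pvScan, if_neg (by omega : ¬ run + 1 = 2)]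
    rw [ih u (run + 1) res (by omega),
      show run + 1 + (k : Int) = run + ((k + 1 : Nat) : Int) by push_cast; ring]
    simp

lemma pvScan_run1 (c : Int × Int) (m : Nat) (u : List (Int × Int)) (res : Int) :
    pvScan (List.replicate m c ++ u) (some c) 1 res
      = pvScan u (some c) (1 + m) (if 1 ≤ m then res + 1 else res) := by
  cases m with
  | zero => simp
  | succ k =>
    rw [List.replicate_succ, List.cons_append]
    simp only [pvScan]
    norm_num
    rw [pvScan_run2 c k u 2 (res + 1) (by omega),
      show (2 : Int) + (k : Int) = 1 + ((k : Int) + 1) by ring]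

lemma pvScan_skip (c : Int × Int) (u : List (Int × Int)) (h : ∀ x ∈ u, x ≠ c) (run res : Int) :
    pvScan u (some c) run res = pvScan u none 0 res := by
  cases u with
  | nil => rfl
  | cons d u' =>
    have hd : d ≠ c := h d (List.mem_cons_self)
    simp only [pvScan]
    rw [if_neg (by simpa using (Ne.symm hd)), if_neg (by simp)]

lemma pvDups_cons_group (c : Int × Int) (m : Nat) (u : List (Int × Int)) (hu : c ∉ u) :
    pvDups (c :: (List.replicate m c ++ u)) = (if 1 ≤ m then 1 else 0) + pvDups u := by
  have hcnt_c : (c :: (List.replicate m c ++ u)).count c = m + 1 := by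
    simp [List.count_append, List.count_eq_zero_of_not_mem hu]
  have hcnt_ne : ∀ x : Int × Int, x ≠ c → (c :: (List.replicate m c ++ u)).count x = u.count x := by
    intro x hx
    simp [List.count_append, List.count_replicate,
      (by simpa [eq_comm] using hx : ¬ c = x)]
  have hfin : (c :: (List.replicate m c ++ u)).toFinset = insert c u.toFinset := by
    ext x
    simp [List.mem_replicate]
    tauto
  have hcu : c ∉ u.toFinset := by simpa using hu
  have hfeq : u.toFinset.filter (fun x => 2 ≤ (c :: (List.replicate m c ++ u)).count x)
      = u.toFinset.filter (fun x => 2 ≤ u.count x) := by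
    apply Finset.filter_congr
    intro x hx
    have : x ≠ c := fun h => hcu (h ▸ hx)
    simp [hcnt_ne x this]
  unfold pvDups
  rw [hfin, Finset.filter_insert, hfeq]
  by_cases hm : 1 ≤ m
  · rw [if_pos (by rw [hcnt_c]; omega : 2 ≤ (c :: (List.replicate m c ++ u)).count c),
      if_pos hm,
      Finset.card_insert_of_notMem (fun hmem => hcu (Finset.mem_of_mem_filter c hmem))]
    omega
  · rw [if_neg (by rw [hcnt_c]; omega : ¬ 2 ≤ (c :: (List.replicate m c ++ u)).count c),
      if_neg hm]
    simp

lemma pvScan_sorted : ∀ (n : Nat) (l : List (Int × Int)), l.length ≤ n →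
    l.Pairwise (fun a b => toLex a ≤ toLex b) → pvScan l none 0 0 = (pvDups l : Int) := by
  intro n
  induction n with
  | zero =>
    intro l hl _
    have hnil : l = [] := List.length_eq_zero_iff.mp (by omega)
    subst hnil
    simp [pvScan, pvDups]
  | succ n ih =>
    intro l hl hp
    cases l with
    | nil => simp [pvScan, pvDups]
    | cons c t =>
      set tw := t.takeWhile (fun x => x == c) with htw_def
      set u := t.dropWhile (fun x => x == c) with hu_def
      set m := tw.length with hm_def
      have htw : tw = List.replicate m c :=
        List.eq_replicate_of_mem (fun b hb => by
          simpa using List.mem_takeWhile_imp hb)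
      have ht : t = List.replicate m c ++ u := by
        rw [← htw, htw_def, hu_def, List.takeWhile_append_dropWhile]
      -- every element of u differs from c
      have hsub : u.Sublist t := by rw [hu_def]; exact List.dropWhile_sublist _
      have ht_pair : t.Pairwise (fun a b => toLex a ≤ toLex b) := (List.pairwise_cons.mp hp).2
      have hu_pair : u.Pairwise (fun a b => toLex a ≤ toLex b) :=
        List.Pairwise.sublist hsub ht_pair
      have hu_ne : ∀ x ∈ u, x ≠ c := by
        cases hu : u with
        | nil => simp
        | cons d u' =>
          intro x hx
          have hd : d ≠ c := by
            have hdw : t.dropWhile (fun x => x == c) = d :: u' := by rw [← hu_def, hu]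
            have w : t.dropWhile (fun x => x == c) ≠ [] := by rw [hdw]; simp
            have h2 := List.head_dropWhile_not (fun x => x == c) w
            have h3 : (t.dropWhile (fun x => x == c)).head w = d := by simp [hdw]
            rw [h3] at h2
            simpa using h2
          have hdt : d ∈ t := hsub.subset (by rw [hu]; simp)
          have hcd : toLex c < toLex d := by
            have hle : toLex c ≤ toLex d := (List.pairwise_cons.mp hp).1 d hdt
            have : (toLex c : Lex (Int × Int)) ≠ toLex d := by
              simpa using (fun h => hd (by simpa using h.symm))
            exact lt_of_le_of_ne hle this
          have hdu : (d :: u').Pairwise (fun a b => toLex a ≤ toLex b) := by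
            rw [← hu]; exact hu_pair
          have hdx : toLex d ≤ toLex x := by
            rcases List.mem_cons.mp hx with hx | hx
            · rw [hx]
            · exact (List.pairwise_cons.mp hdu).1 x hx
          intro hxc
          rw [hxc] at hdx
          exact absurd (lt_of_lt_of_le hcd hdx) (lt_irrefl _)
      have hlen : u.length ≤ n := by
        have := hsub.length_le
        simp only [List.length_cons] at hl
        omega
      have step1 : pvScan (c :: t) none 0 0 = pvScan t (some c) 1 0 := by
        simp [pvScan]
      rw [step1, ht, pvScan_run1, pvScan_skip c u hu_ne,
        show (if 1 ≤ m then (0 : Int) + 1 else 0) = (if 1 ≤ m then (1 : Int) else 0) + 0 by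
          split_ifs <;> ring,
        pvScan_add, ih u hlen hu_pair,
        pvDups_cons_group c m u (fun h => hu_ne c h rfl)]
      push_cast
      split_ifs <;> ring

lemma pv_sorted2_perm (xs : List (Int × Int)) :
    (PySem.List.sorted2 xs (fun c => c.1) (fun c => c.2) false).Perm xs :=
  PySem.List.sorted2_perm xs _ _ false

lemma pv_B_eq (xs : List (Int × Int)) : return_overlap_count_alt xs = (pvDups xs : Int) := by
  unfold return_overlap_count_alt
  rw [pvScan_sorted (PySem.List.sorted2 xs (fun c => c.1) (fun c => c.2) false).length _
    le_rfl (pv_sorted2_pairwise xs)]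
  exact congrArg _ (pvDups_perm (pv_sorted2_perm xs))

lemma pv_countP_eq (xs : List (Int × Int)) :
    (PySem.Set.ofList xs).countP (fun k => decide (1 < ((xs.count k : Int)))) = pvDups xs := by
  have hnd : (PySem.Set.ofList xs).Nodup := PySem.Set.nodup_ofList xs
  rw [List.countP_eq_length_filter,
    ← List.toFinset_card_of_nodup (hnd.filter _), List.toFinset_filter]
  unfold pvDups
  rw [show (PySem.Set.ofList xs).toFinset = xs.toFinset by
    ext x; simp [PySem.Set.mem_ofList]]
  congr 1
  apply Finset.filter_congr
  intro x _
  constructor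
  · intro h
    simp only [decide_eq_true_eq] at h ⊢
    omega
  · intro h
    simp only [decide_eq_true_eq] at h ⊢
    omega

lemma pv_A_eq (xs : List (Int × Int)) : return_overlap_count xs = (pvDups xs : Int) := by
  simp only [return_overlap_count]
  have hfold : xs.foldl
      (fun d cord => if d.contains cord then d.modify cord 0 (· + 1) else d.insert cord (1 : Int))
      PySem.Dict.empty = PySem.Dict.counter xs := by
    rw [PySem.Dict.counter_eq_foldl]
    apply PySem.List.foldl_congr_mem'
    intro x _ acc
    by_cases hc : acc.contains x = true
    · simp [hc]
    · rw [if_neg hc]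
      rw [PySem.Dict.modify,
        PySem.Dict.getD_of_not_contains acc 0 (by simpa using hc)]
      norm_num
  rw [hfold, PySem.Dict.items_counter,
    PySem.List.foldl_ite_add_one (fun p : (Int × Int) × Int => 1 < p.2),
    List.countP_map]
  rw [show ((fun p : (Int × Int) × Int => decide (1 < p.2)) ∘
      (fun k => (k, ((xs.count k : Int))))) = fun k => decide (1 < ((xs.count k : Int))) from rfl]
  rw [pv_countP_eq]
  ring

-- ===== VERDICT (by name: the statement is the Claim_ definition above) =====
theorem return_overlap_count_spec : Claim_equal_return_overlap_count := by
  intro xs _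
  unfold Spec_return_overlap_count
  rw [pv_A_eq, pv_B_eq]
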